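-- pv_equiv track=rewrite | github.com/PortlandStatePowerLab/Aggregated_Load_Analysis | data_analysis/confidence_plt.py | find_positive_regions
-- ===== SOURCE A (Python) =====
-- def find_positive_regions(y):
--     regions = []
--     in_region = False
--     start = 0
--
--     for i in range(len(y)):
--         if y[i] > 0 and not in_region:
--             start = i
--             in_region = True
--         elif y[i] <= 0 and in_region:
--             regions.append((start, i))
--             in_region = False
--
--     if in_region:
--         regions.append((start, len(y)))
--
--     return regions
-- ===== SOURCE B (Python) =====
-- def find_positive_regions(y):
--     starts = [i for i, (p, v) in enumerate(zip([0] + y, y)) if v > 0 and p <= 0]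
--     ends = [i + 1 for i, (v, nx) in enumerate(zip(y, y[1:] + [0])) if v > 0 and nx <= 0]
--     return list(zip(starts, ends))
-- ===== Notes on version B (the rewrite author's own statement) =====
-- stated objective: alternative
-- what changed: Replaced A's one-pass in_region flag state machine by edge detection: region starts and exclusive ends are read off by zipping y with shifted copies of itself in two comprehensions, then zipped into (start, end) pairs.
import Mathlib
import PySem

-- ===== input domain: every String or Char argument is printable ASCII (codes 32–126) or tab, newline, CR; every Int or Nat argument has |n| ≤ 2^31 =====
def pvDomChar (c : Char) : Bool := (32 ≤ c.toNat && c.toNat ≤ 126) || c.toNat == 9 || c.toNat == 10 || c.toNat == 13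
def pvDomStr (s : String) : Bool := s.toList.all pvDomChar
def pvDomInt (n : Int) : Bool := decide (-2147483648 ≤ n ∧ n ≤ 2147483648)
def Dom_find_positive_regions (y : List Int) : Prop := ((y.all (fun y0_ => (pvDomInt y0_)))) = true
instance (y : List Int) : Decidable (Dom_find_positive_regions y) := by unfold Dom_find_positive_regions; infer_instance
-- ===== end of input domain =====

-- B replaces A's in_region flag machine by edge detection: run starts/ends are read off by
-- zipping y with shifted copies of itself (alternative decomposition, same O(n) cost).

-- ===== PORT A =====
-- loop body of A: state = (regions, in_region, start), p = (i, y[i])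
def pvStepA (s : List (Int × Int) × Bool × Int) (p : Int × Int) : List (Int × Int) × Bool × Int :=
  if 0 < p.2 ∧ s.2.1 = false then (s.1, true, p.1)
  else if p.2 ≤ 0 ∧ s.2.1 = true then (s.1 ++ [(s.2.2, p.1)], false, s.2.2)
  else s

def find_positive_regions (y : List Int) : List (Int × Int) :=
  let st := (PySem.List.pyRange 0 (y.length : Int) 1).foldl
      (fun s i => pvStepA s (i, PySem.List.pyGetD y i 0)) ([], false, 0)
  if st.2.1 = true then st.1 ++ [(st.2.2, (y.length : Int))] else st.1

-- ===== PORT B =====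
def find_positive_regions_alt (y : List Int) : List (Int × Int) :=
  let starts := ((PySem.List.enumerate (List.zip (0 :: y) y) 0).filter
      (fun q => decide (0 < q.2.2) && decide (q.2.1 ≤ 0))).map (·.1)
  let ends := ((PySem.List.enumerate (List.zip y (PySem.List.slice y (some 1) none ++ [0])) 0).filter
      (fun q => decide (0 < q.2.1) && decide (q.2.2 ≤ 0))).map (fun q => q.1 + 1)
  starts.zip ends

-- ===== PRECONDITION & SPEC =====
def Spec_find_positive_regions (y : List Int) (out : List (Int × Int)) : Prop := out = find_positive_regions_alt y
instance (y : List Int) (out : List (Int × Int)) : Decidable (Spec_find_positive_regions y out) := by unfold Spec_find_positive_regions; infer_instance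

-- ===== CLAIM (what is proved, stated in full; the proofs are below) =====
def Claim_equal_find_positive_regions : Prop := ∀ (y : List Int), Dom_find_positive_regions y → Spec_find_positive_regions y (find_positive_regions y)

-- ===== LEMMAS AND PROOFS =====

-- start indices of positive runs in suffix l at absolute index i; b = "previous element positive"
def pvStF (b : Bool) (i : Int) : List Int → List Int
  | [] => []
  | v :: r => if 0 < v then (if b then pvStF true (i+1) r else i :: pvStF true (i+1) r) else pvStF false (i+1) r

-- exclusive end indices of positive runs in suffix l at absolute index i; b = "previous element positive"
def pvEnF (b : Bool) (i : Int) : List Int → List Int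
  | [] => if b then [i] else []
  | v :: r => if 0 < v then pvEnF true (i+1) r else (if b then i :: pvEnF false (i+1) r else pvEnF false (i+1) r)

-- A's trailing-region flush, as a named function so the induction hypothesis applies syntactically
def pvFinish (st : List (Int × Int) × Bool × Int) (n : Int) : List (Int × Int) :=
  if st.2.1 = true then st.1 ++ [(st.2.2, n)] else st.1

-- A's machine, run from an arbitrary state over a suffix, yields regions ++ zip of the suffix's starts/ends
lemma pvAfold_eq (l : List Int) : ∀ (b : Bool) (i start : Int) (regions : List (Int × Int)),
    pvFinish ((PySem.List.enumerate l i).foldl pvStepA (regions, b, start)) (i + (l.length : Int))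
    = regions ++ List.zip (if b then start :: pvStF true i l else pvStF false i l) (pvEnF b i l) := by
  induction l with
  | nil =>
    intro b i start regions
    cases b <;> simp [PySem.List.enumerate_nil, pvStF, pvEnF, pvFinish]
  | cons v r ih =>
    intro b i start regions
    rw [PySem.List.enumerate_cons]
    simp only [List.foldl_cons]
    have harith : i + ((v :: r).length : Int) = (i + 1) + (r.length : Int) := by
      simp [List.length_cons]; ring
    rw [harith]
    by_cases hv : 0 < v
    · have hv' : ¬ v ≤ 0 := by omega
      cases b with
      | false =>
        have hstep : pvStepA (regions, false, start) (i, v) = (regions, true, i) := by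
          simp [pvStepA, hv]
        rw [hstep, ih]
        simp [pvStF, pvEnF, hv]
      | true =>
        have hstep : pvStepA (regions, true, start) (i, v) = (regions, true, start) := by
          simp [pvStepA, hv, hv']
        rw [hstep, ih]
        simp [pvStF, pvEnF, hv]
    · have hv' : v ≤ 0 := by omega
      cases b with
      | false =>
        have hstep : pvStepA (regions, false, start) (i, v) = (regions, false, start) := by
          simp [pvStepA, hv]
        rw [hstep, ih]
        simp [pvStF, pvEnF, hv]
      | true =>
        have hstep : pvStepA (regions, true, start) (i, v) = (regions ++ [(start, i)], false, start) := by
          simp [pvStepA, hv, hv']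
        rw [hstep, ih]
        simp [pvStF, pvEnF, hv]

-- B's starts comprehension over a suffix computes pvStF, with p the element before the suffix
lemma pvStarts_eq (l : List Int) : ∀ (i p : Int),
    (((PySem.List.enumerate (List.zip (p :: l) l) i).filter
        (fun q => decide (0 < q.2.2) && decide (q.2.1 ≤ 0))).map (·.1))
    = pvStF (decide (0 < p)) i l := by
  induction l with
  | nil => intro i p; simp [pvStF, PySem.List.enumerate_nil]
  | cons v r ih =>
    intro i p
    rw [show List.zip (p :: v :: r) (v :: r) = (p, v) :: List.zip (v :: r) r from rfl,
        PySem.List.enumerate_cons]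
    by_cases hv : 0 < v
    · by_cases hp : 0 < p
      · have hp' : ¬ p ≤ 0 := by omega
        simp [pvStF, hv, hp, hp', ih]
      · have hp' : p ≤ 0 := by omega
        simp [pvStF, hv, hp, hp', ih]
    · by_cases hp : 0 < p
      · simp [pvStF, hv, ih]
      · simp [pvStF, hv, ih]

-- B's ends comprehension over a suffix computes pvEnF
lemma pvEnds_eq (l : List Int) : ∀ (i : Int) (b : Bool),
    pvEnF b i l
    = (if b && decide (l.headD 0 ≤ 0) then [i] else [])
      ++ (((PySem.List.enumerate (List.zip l (l.tail ++ [0])) i).filter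
            (fun q => decide (0 < q.2.1) && decide (q.2.2 ≤ 0))).map (fun q => q.1 + 1)) := by
  induction l with
  | nil =>
    intro i b
    cases b <;> simp [pvEnF, PySem.List.enumerate_nil]
  | cons v r ih =>
    intro i b
    have hzip : List.zip (v :: r) ((v :: r).tail ++ [0])
        = (v, r.headD 0) :: List.zip r (r.tail ++ [0]) := by
      cases r <;> rfl
    rw [hzip, PySem.List.enumerate_cons]
    by_cases hv : 0 < v
    · have hv' : ¬ v ≤ 0 := by omega
      by_cases hh : r.head?.getD 0 ≤ 0
      · cases b <;> simp [pvEnF, hv, hv', hh, ih (i + 1) true]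
      · cases b <;> simp [pvEnF, hv, hv', hh, ih (i + 1) true]
    · have hv' : v ≤ 0 := by omega
      cases b <;> simp [pvEnF, hv, hv', ih (i + 1) false]

-- ===== VERDICT (by name: the statement is the Claim_ definition above) =====
theorem find_positive_regions_spec : Claim_equal_find_positive_regions := by
  intro y _
  unfold Spec_find_positive_regions
  have hfold : (PySem.List.pyRange 0 (y.length : Int) 1).foldl
      (fun s i => pvStepA s (i, PySem.List.pyGetD y i 0)) ([], false, 0)
      = (PySem.List.enumerate y 0).foldl pvStepA ([], false, 0) := by
    rw [PySem.List.enumerate_eq_map_pyRange (d := 0), List.foldl_map]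
    rfl
  have hA := pvAfold_eq y false 0 0 []
  simp only [zero_add, Bool.false_eq_true, if_false, List.nil_append] at hA
  have hst := pvStarts_eq y 0 0
  norm_num at hst
  have hen := pvEnds_eq y 0 false
  simp only [Bool.false_and, Bool.false_eq_true, if_false, List.nil_append] at hen
  have h1 : find_positive_regions y
      = pvFinish ((PySem.List.pyRange 0 (y.length : Int) 1).foldl
          (fun s i => pvStepA s (i, PySem.List.pyGetD y i 0)) ([], false, 0)) (y.length : Int) := rfl
  rw [h1, hfold, hA]
  unfold find_positive_regions_alt
  rw [PySem.List.slice_from_one, hst, ← hen]
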